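-- pv_equiv track=rewrite | github.com/yeemio/owlclaw-core | owlclaw/capabilities/bindings/http_executor.py | _host_allowed
-- ===== SOURCE A (Python) =====
-- def _host_allowed(host: str, allowed_hosts: list[str]) -> bool:
--     normalized_host = host.strip().lower()
--     for raw in allowed_hosts:
--         candidate = raw.strip().lower()
--         if not candidate:
--             continue
--         if normalized_host == candidate:
--             return True
--         if normalized_host.endswith(f".{candidate}"):
--             return True
--     return False
-- ===== SOURCE B (Python) =====
-- def _host_allowed(host: str, allowed_hosts: list[str]) -> bool:
--     allowed = {r.strip().lower() for r in allowed_hosts if r.strip()}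
--     h = host.strip().lower()
--     if h in allowed:
--         return True
--     while h:
--         ch, h = h[0], h[1:]
--         if ch == '.' and h in allowed:
--             return True
--     return False
-- ===== Notes on version B (the rewrite author's own statement) =====
-- stated objective: alternative
-- what changed: A scans every allowed host and runs an equality/endswith string test per candidate; B builds the normalized allowed set once and instead walks the host string a single time, testing membership of the full host and of each suffix following a '.' in the set.
import Mathlib
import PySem

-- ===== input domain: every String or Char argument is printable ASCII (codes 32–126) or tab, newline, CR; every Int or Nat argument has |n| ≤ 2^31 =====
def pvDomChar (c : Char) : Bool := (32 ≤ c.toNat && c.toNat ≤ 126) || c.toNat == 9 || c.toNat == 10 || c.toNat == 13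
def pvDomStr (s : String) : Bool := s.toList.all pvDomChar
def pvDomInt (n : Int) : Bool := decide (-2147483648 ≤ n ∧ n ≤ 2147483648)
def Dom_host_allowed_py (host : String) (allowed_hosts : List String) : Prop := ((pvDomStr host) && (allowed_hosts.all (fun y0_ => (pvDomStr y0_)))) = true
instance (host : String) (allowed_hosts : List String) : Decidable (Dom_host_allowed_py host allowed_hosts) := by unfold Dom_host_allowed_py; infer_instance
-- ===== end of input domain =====

-- B replaces A's per-candidate scan (equality / endswith test against every allowed host) by one
-- prebuilt normalized set and a single walk over the host's dot-suffixes (objective: alternative).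

-- ===== PORT A =====
-- candidate = raw.strip().lower()  (the same normalization line appears in both Pythons)
def normCand (r : String) : List Char := PySem.Chars.lower (PySem.Chars.strip r.toList)

-- A's `for raw in allowed_hosts` loop with its early returns (h = normalized host)
def hostAllowedGo (h : List Char) : List String → Bool
  | [] => false
  | raw :: rest =>
    if normCand raw = [] then hostAllowedGo h rest
    else if h = normCand raw then true
    else if PySem.Chars.endswith h ('.' :: normCand raw) then true
    else hostAllowedGo h rest

def host_allowed_py (host : String) (allowed_hosts : List String) : Bool :=
  hostAllowedGo (PySem.Chars.lower (PySem.Chars.strip host.toList)) allowed_hosts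

-- ===== PORT B =====
-- allowed = {r.strip().lower() for r in allowed_hosts if r.strip()}
def hostAllowedSet (allowed_hosts : List String) : PySem.Set (List Char) :=
  PySem.Set.ofList
    ((allowed_hosts.filter (fun r => !(PySem.Chars.strip r.toList).isEmpty)).map normCand)

-- B's `while h:` loop: peel one char at a time; after a '.', test the remaining suffix
def hostAllowedTail (S : PySem.Set (List Char)) : List Char → Bool
  | [] => false
  | ch :: rest => if ch = '.' ∧ rest ∈ S then true else hostAllowedTail S rest

def host_allowed_py_alt (host : String) (allowed_hosts : List String) : Bool :=
  if PySem.Chars.lower (PySem.Chars.strip host.toList) ∈ hostAllowedSet allowed_hosts then true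
  else hostAllowedTail (hostAllowedSet allowed_hosts)
    (PySem.Chars.lower (PySem.Chars.strip host.toList))

-- ===== PRECONDITION & SPEC =====
def Spec_host_allowed_py (host : String) (allowed_hosts : List String) (out : Bool) : Prop := out = host_allowed_py_alt host allowed_hosts
instance (host : String) (allowed_hosts : List String) (out : Bool) : Decidable (Spec_host_allowed_py host allowed_hosts out) := by unfold Spec_host_allowed_py; infer_instance

-- ===== CLAIM (what is proved, stated in full; the proofs are below) =====
def Claim_equal_host_allowed_py : Prop := ∀ (host : String) (allowed_hosts : List String), Dom_host_allowed_py host allowed_hosts → Spec_host_allowed_py host allowed_hosts (host_allowed_py host allowed_hosts)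

-- ===== LEMMAS AND PROOFS =====

theorem normCand_ne_nil (r : String) :
    normCand r ≠ [] ↔ PySem.Chars.strip r.toList ≠ [] := by
  simp [normCand, PySem.Chars.lower]

theorem hostAllowedGo_iff (h : List Char) (l : List String) :
    hostAllowedGo h l = true ↔
      ∃ r ∈ l, normCand r ≠ [] ∧
        (h = normCand r ∨ PySem.Chars.endswith h ('.' :: normCand r) = true) := by
  induction l with
  | nil => simp [hostAllowedGo]
  | cons raw rest ih =>
    simp only [hostAllowedGo, List.exists_mem_cons_iff]
    split_ifs with h1 h2 h3
    · simp [h1, ih]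
    · simp only [true_iff]
      exact Or.inl ⟨h1, Or.inl h2⟩
    · simp only [true_iff]
      exact Or.inl ⟨h1, Or.inr h3⟩
    · simp [h1, h2, h3, ih]

theorem hostAllowedTail_iff (S : PySem.Set (List Char)) (h : List Char) :
    hostAllowedTail S h = true ↔ ∃ p c, h = p ++ '.' :: c ∧ c ∈ S := by
  induction h with
  | nil =>
    simp only [hostAllowedTail, Bool.false_eq_true, false_iff]
    rintro ⟨p, c, hh, -⟩
    exact absurd hh.symm (by simp)
  | cons ch rest ih =>
    simp only [hostAllowedTail]
    split_ifs with hcond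
    · obtain ⟨hdot, hmem⟩ := hcond
      simp only [true_iff]
      exact ⟨[], rest, by simp [hdot], hmem⟩
    · rw [ih]
      constructor
      · rintro ⟨p, c, hh, hc⟩
        exact ⟨ch :: p, c, by rw [hh]; rfl, hc⟩
      · rintro ⟨p, c, hh, hc⟩
        cases p with
        | nil =>
          simp only [List.nil_append, List.cons.injEq] at hh
          exact absurd ⟨hh.1, hh.2 ▸ hc⟩ hcond
        | cons q p' =>
          simp only [List.cons_append, List.cons.injEq] at hh
          exact ⟨p', c, hh.2, hc⟩

theorem mem_hostAllowedSet (allowed : List String) (c : List Char) :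
    c ∈ hostAllowedSet allowed ↔
      ∃ r ∈ allowed, PySem.Chars.strip r.toList ≠ [] ∧ normCand r = c := by
  simp [hostAllowedSet, PySem.Set.mem_ofList, List.mem_map, List.mem_filter]
  tauto

-- ===== VERDICT (by name: the statement is the Claim_ definition above) =====
theorem host_allowed_py_spec : Claim_equal_host_allowed_py := by
  intro host allowed _
  unfold Spec_host_allowed_py host_allowed_py host_allowed_py_alt
  rw [Bool.eq_iff_iff, hostAllowedGo_iff]
  constructor
  · rintro ⟨r, hr, hne, hcase⟩
    have hmem : normCand r ∈ hostAllowedSet allowed :=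
      (mem_hostAllowedSet _ _).mpr ⟨r, hr, (normCand_ne_nil r).mp hne, rfl⟩
    rcases hcase with heq | hend
    · rw [heq, if_pos hmem]
    · obtain ⟨p, hp⟩ := (PySem.Chars.endswith_iff _ _).mp hend
      have htail := (hostAllowedTail_iff (hostAllowedSet allowed)
        (PySem.Chars.lower (PySem.Chars.strip host.toList))).mpr ⟨p, normCand r, hp.symm, hmem⟩
      split_ifs with hin
      · rfl
      · exact htail
  · intro hb
    by_cases hin :
        PySem.Chars.lower (PySem.Chars.strip host.toList) ∈ hostAllowedSet allowed
    · obtain ⟨r, hr, hs, hc⟩ := (mem_hostAllowedSet _ _).mp hin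
      exact ⟨r, hr, (normCand_ne_nil r).mpr hs, Or.inl hc.symm⟩
    · rw [if_neg hin] at hb
      obtain ⟨p, c, hh, hcS⟩ := (hostAllowedTail_iff _ _).mp hb
      obtain ⟨r, hr, hs, hc⟩ := (mem_hostAllowedSet _ _).mp hcS
      refine ⟨r, hr, (normCand_ne_nil r).mpr hs, Or.inr ?_⟩
      exact (PySem.Chars.endswith_iff _ _).mpr ⟨p, by rw [hc]; exact hh.symm⟩
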